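-- pv_equiv track=rewrite | github.com/kossisoroyce/Continuous-AI-Consciousness-Architecture | backend/hmt/workload.py | _count_typo_indicators
-- ===== SOURCE A (Python) =====
-- def _count_typo_indicators(message: str) -> int:
--     """Count potential typo indicators (simple heuristic)."""
--     count = 0
--     words = message.split()
--
--     for word in words:
--         # Very short words with unusual characters
--         if len(word) <= 2 and not word.isalpha():
--             count += 1
--         # Repeated characters (e.g., "helllo")
--         for i in range(len(word) - 2):
--             if word[i] == word[i+1] == word[i+2]:
--                 count += 1
--
--     return count
-- ===== SOURCE B (Python) =====
-- def _count_typo_indicators(message: str) -> int: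
--     """Count potential typo indicators (simple heuristic)."""
--     count = 0
--     for word in message.split():
--         # Very short words with unusual characters
--         if len(word) <= 2 and not word.isalpha():
--             count += 1
--         # Repeated characters: a run of L identical chars holds L-2 triples
--         run = 0
--         prev = None
--         for ch in word:
--             if ch == prev:
--                 run += 1
--             else:
--                 if run > 2:
--                     count += run - 2
--                 run = 1
--                 prev = ch
--         if run > 2:
--             count += run - 2
--     return count
-- ===== Notes on version B (the rewrite author's own statement) =====
-- stated objective: faster
-- what changed: The inner overlapping-triple window scan (word[i]==word[i+1]==word[i+2] over range(len(word)-2)) is replaced by a single run-length pass per word that adds max(0, L-2) for each maximal run of L identical characters, removing all indexed triple lookups.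
import Mathlib
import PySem

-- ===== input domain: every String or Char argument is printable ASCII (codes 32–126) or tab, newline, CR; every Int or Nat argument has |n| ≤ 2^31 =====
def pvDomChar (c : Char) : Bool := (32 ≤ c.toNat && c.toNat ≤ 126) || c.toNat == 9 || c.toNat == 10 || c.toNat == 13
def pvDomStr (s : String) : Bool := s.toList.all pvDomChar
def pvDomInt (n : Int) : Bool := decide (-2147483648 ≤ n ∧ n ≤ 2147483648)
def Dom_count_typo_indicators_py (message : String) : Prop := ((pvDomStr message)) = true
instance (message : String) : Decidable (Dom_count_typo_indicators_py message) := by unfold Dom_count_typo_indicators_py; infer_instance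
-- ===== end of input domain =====

-- B replaces A's inner overlapping-triple window scan by a run-length pass per word
-- (each maximal run of L identical characters contributes max 0 (L-2)); same result, different traversal.

-- ===== PORT A =====
def count_typo_indicators_py (message : String) : Int :=
  let words := PySem.Str.split₀ message
  words.foldl (fun count word =>
    let count : Int :=
      if PySem.Str.len word ≤ 2 ∧ PySem.Str.strIsalpha word = false then count + 1 else count
    (PySem.List.pyRange 0 (PySem.Str.len word - 2) 1).foldl
      (fun count i =>
        if PySem.Str.pyGet? word i = PySem.Str.pyGet? word (i + 1) ∧
           PySem.Str.pyGet? word (i + 1) = PySem.Str.pyGet? word (i + 2) then count + 1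
        else count)
      count) 0

-- ===== PORT B =====
-- the 'for ch in word' run-length loop of Source B, plus the trailing flush
def runLoop : List Char → Int → Int → Option Char → Int
  | [], count, run, _ => if run > 2 then count + (run - 2) else count
  | ch :: rest, count, run, prev =>
    if some ch = prev then runLoop rest count (run + 1) prev
    else runLoop rest (if run > 2 then count + (run - 2) else count) 1 (some ch)

def count_typo_indicators_py_alt (message : String) : Int :=
  (PySem.Str.split₀ message).foldl (fun count word =>
    let count : Int :=
      if PySem.Str.len word ≤ 2 ∧ PySem.Str.strIsalpha word = false then count + 1 else count
    runLoop word.toList count 0 none) 0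

-- ===== PRECONDITION & SPEC =====
def Spec_count_typo_indicators_py (message : String) (out : Int) : Prop := out = count_typo_indicators_py_alt message
instance (message : String) (out : Int) : Decidable (Spec_count_typo_indicators_py message out) := by unfold Spec_count_typo_indicators_py; infer_instance

-- ===== CLAIM (what is proved, stated in full; the proofs are below) =====
def Claim_equal_count_typo_indicators_py : Prop := ∀ (message : String), Dom_count_typo_indicators_py message → Spec_count_typo_indicators_py message (count_typo_indicators_py message)

-- ===== LEMMAS AND PROOFS =====

-- number of overlapping equal-triples, structurally
def winCount : List Char → Int
  | a :: b :: c :: t => (if a = b ∧ b = c then 1 else 0) + winCount (b :: c :: t)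
  | _ => 0

-- a maximal run of m copies of p followed by a different char (or nothing) holds max 0 (m-2) triples
lemma win_rep (p : Char) (t : List Char)
    (ht : t = [] ∨ ∃ c t', t = c :: t' ∧ c ≠ p) (m : Nat) :
    winCount (List.replicate m p ++ t) = max 0 ((m : Int) - 2) + winCount t := by
  induction m using Nat.twoStepInduction with
  | zero => simp
  | one =>
    rcases ht with rfl | ⟨c, t', rfl, hc⟩
    · simp [winCount]
    · cases t' with
      | nil => simp [winCount]
      | cons d t'' =>
        have hpc : ¬(p = c ∧ c = d) := fun ⟨h1, _⟩ => hc h1.symm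
        simp [winCount, hpc]
  | more n ihn ihn1 =>
    rw [show List.replicate (n + 2) p ++ t = p :: p :: (List.replicate n p ++ t) by
      simp [List.replicate_succ]]
    cases n with
    | zero =>
      rcases ht with rfl | ⟨c, t', rfl, hc⟩
      · simp [winCount]
      · have h1 := ihn1
        simp only [List.replicate, List.cons_append, List.nil_append] at h1
        simp only [List.replicate, List.nil_append, winCount] at h1 ⊢
        rw [if_neg (fun h => hc (And.right h).symm), h1]
        push_cast
        omega
    | succ j =>
      rw [show List.replicate (j + 1) p ++ t = p :: (List.replicate j p ++ t) by
        simp [List.replicate_succ]]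
      have hih := ihn1
      rw [show List.replicate (j + 1 + 1) p ++ t = p :: p :: (List.replicate j p ++ t) by
        simp [List.replicate_succ]] at hih
      simp only [winCount] at hih ⊢
      rw [if_pos ⟨trivial, trivial⟩, hih]
      push_cast
      omega

lemma run_inv (rest : List Char) : ∀ (count : Int) (m : Nat) (p : Char), 1 ≤ m →
    runLoop rest count (m : Int) (some p) = count + winCount (List.replicate m p ++ rest) := by
  induction rest with
  | nil =>
    intro count m p _
    rw [List.append_nil]
    have hw := win_rep p [] (Or.inl rfl) m
    rw [List.append_nil] at hw
    simp only [runLoop]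
    rw [hw, show winCount [] = 0 from rfl]
    split_ifs <;> omega
  | cons ch rest ih =>
    intro count m p hm
    by_cases h : ch = p
    · subst h
      simp only [runLoop]
      rw [show (m : Int) + 1 = ((m + 1 : Nat) : Int) by push_cast; ring]
      rw [ih count (m + 1) ch (by omega)]
      rw [List.replicate_succ']
      simp [List.append_assoc]
    · simp only [runLoop]
      rw [if_neg (by simp [h])]
      rw [show (1 : Int) = ((1 : Nat) : Int) by norm_num]
      rw [ih _ 1 ch (by omega)]
      rw [win_rep p (ch :: rest) (Or.inr ⟨ch, rest, rfl, h⟩) m]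
      simp only [List.replicate, List.cons_append, List.nil_append]
      split_ifs <;> omega

lemma runLoop_eq (w : List Char) (count : Int) :
    runLoop w count 0 none = count + winCount w := by
  cases w with
  | nil => simp [runLoop, winCount]
  | cons ch rest =>
    simp only [runLoop]
    rw [if_neg (by simp)]
    rw [if_neg (by norm_num)]
    rw [show (1 : Int) = ((1 : Nat) : Int) by norm_num]
    rw [run_inv rest _ 1 ch (by omega)]
    simp [List.replicate]

lemma rangeFold_eq (w : List Char) : ∀ (c : Int),
    (List.range (w.length - 2)).foldl
      (fun count k => if w[k]? = w[k + 1]? ∧ w[k + 1]? = w[k + 2]? then count + 1 else count) c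
    = c + winCount w := by
  induction w with
  | nil => intro c; simp [winCount]
  | cons a w' ih =>
    intro c
    match w' with
    | [] => simp [winCount]
    | [b] => simp [winCount]
    | b :: cc :: t =>
      have hlen : (a :: b :: cc :: t).length - 2 = t.length + 1 := by simp
      rw [hlen, List.range_succ_eq_map, List.foldl_cons, List.foldl_map]
      rw [PySem.List.foldl_congr_mem _ _
        (fun count k => if (b :: cc :: t)[k]? = (b :: cc :: t)[k + 1]? ∧
            (b :: cc :: t)[k + 1]? = (b :: cc :: t)[k + 2]? then count + 1 else count) _
        (by
          intro acc y _
          simp only [Nat.succ_eq_add_one]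
          rw [show y + 1 + 2 = y + 2 + 1 from by omega]
          simp [List.getElem?_cons_succ])]
      have h2 := ih (if (a :: b :: cc :: t)[0]? = (a :: b :: cc :: t)[0 + 1]? ∧
          (a :: b :: cc :: t)[0 + 1]? = (a :: b :: cc :: t)[0 + 2]? then c + 1 else c)
      rw [show (b :: cc :: t).length - 2 = t.length from by simp] at h2
      rw [h2]
      simp only [winCount, List.getElem?_cons_zero, Nat.zero_add, List.getElem?_cons_succ,
        Option.some.injEq]
      split_ifs <;> simp_all <;> try omega

lemma tripleA_eq (w : List Char) (c : Int) :
    (PySem.List.pyRange 0 ((w.length : Int) - 2) 1).foldl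
      (fun count i =>
        if PySem.List.pyGet? w i = PySem.List.pyGet? w (i + 1) ∧
           PySem.List.pyGet? w (i + 1) = PySem.List.pyGet? w (i + 2) then count + 1
        else count) c
    = c + winCount w := by
  rw [PySem.List.pyRange_one, List.foldl_map]
  have hb : (((w.length : Int) - 2) - 0).toNat = w.length - 2 := by omega
  rw [hb, ← rangeFold_eq w c]
  apply PySem.List.foldl_congr_mem
  intro acc k _
  rw [show (0 : Int) + (k : Int) = ((k : Nat) : Int) by ring]
  rw [show ((k : Nat) : Int) + 1 = ((k + 1 : Nat) : Int) by push_cast; ring]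
  rw [show ((k : Nat) : Int) + 2 = ((k + 2 : Nat) : Int) by push_cast; ring]
  simp only [PySem.List.pyGet?_natCast]

-- ===== VERDICT (by name: the statement is the Claim_ definition above) =====
theorem count_typo_indicators_py_spec : Claim_equal_count_typo_indicators_py := by
  intro message _
  unfold Spec_count_typo_indicators_py count_typo_indicators_py count_typo_indicators_py_alt
  apply PySem.List.foldl_congr_mem
  intro count word _
  simp only [PySem.Str.pyGet?_eq, PySem.Chars.pyGet?_eq_listPyGet?, PySem.Str.len]
  rw [runLoop_eq]
  exact tripleA_eq word.toList _
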